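-- pv_equiv track=rewrite | github.com/munsie/aoc-2023 | day01/total2.py | rfind_highest_index_in_list
-- ===== SOURCE A (Python) =====
-- def rfind_highest_index_in_list(s, l):
--     offset = -1
--     value = -1
--     for i in range(0, len(l)):
--         o = s.rfind(l[i])
--         if o != -1 and o > offset:
--             offset = o
--             value = i
--
--     return value, offset
-- ===== SOURCE B (Python) =====
-- def rfind_highest_index_in_list(s, l):
--     # Scan positions right-to-left; at the first (highest) position where any
--     # pattern starts, return the lowest-index matching pattern and that position.
--     for p in range(len(s), -1, -1):
--         for i in range(len(l)):
--             if s.startswith(l[i], p):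
--                 return i, p
--     return -1, -1
-- ===== Notes on version B (the rewrite author's own statement) =====
-- stated objective: faster
-- what changed: Instead of computing s.rfind for every pattern and keeping the running maximum offset, B scans string positions from len(s) down to 0 and returns at the first position where some pattern starts (lowest pattern index breaking ties), which reproduces A's max-offset/first-index result with the loop nesting inverted and an early exit.
import Mathlib
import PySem

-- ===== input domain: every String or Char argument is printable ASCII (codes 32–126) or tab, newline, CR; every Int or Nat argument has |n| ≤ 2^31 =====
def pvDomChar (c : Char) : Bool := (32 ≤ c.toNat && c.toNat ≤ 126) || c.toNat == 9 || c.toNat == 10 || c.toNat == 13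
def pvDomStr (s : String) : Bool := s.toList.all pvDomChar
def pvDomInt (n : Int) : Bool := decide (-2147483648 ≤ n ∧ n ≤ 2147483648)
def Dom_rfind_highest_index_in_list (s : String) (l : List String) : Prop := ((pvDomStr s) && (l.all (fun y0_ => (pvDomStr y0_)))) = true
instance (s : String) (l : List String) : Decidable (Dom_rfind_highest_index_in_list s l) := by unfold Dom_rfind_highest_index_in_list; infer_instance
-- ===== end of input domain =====

-- B replaces A's per-pattern rfind loop by a single right-to-left scan over string
-- positions, returning at the first (= highest) position where any pattern starts
-- (objective: alternative decomposition, same result).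

-- ===== PORT A =====
-- literal port: loop i over the patterns (enumerate keeps the index), o = s.rfind(l[i]),
-- keep (offset, value), strict improvement only; return (value, offset)
def rfind_highest_index_in_list (s : String) (l : List String) : Int × Int :=
  let r := (PySem.List.enumerate l).foldl
    (fun (st : Int × Int) (ix : Int × String) =>
      let o := PySem.Str.rfind s ix.2
      if o ≠ -1 ∧ o > st.1 then (o, ix.1) else st)
    (-1, -1)
  (r.2, r.1)

-- ===== PORT B =====
-- inner loop of Source B: first pattern index i (counting from i0) whose pattern starts at
-- this position; s.startswith(pat, p) for 0 ≤ p ≤ len(s) is exactly "pat is a prefix of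
-- s[p:]", ported as Chars.startswith on (s.toList.drop p)
def pvFindAt (tail : List Char) (pats : List String) (i0 : Int) : Option Int :=
  match pats with
  | [] => none
  | q :: rest =>
      if PySem.Chars.startswith tail q.toList then some i0 else pvFindAt tail rest (i0 + 1)

-- outer loop of Source B: p from len(s) down to 0
def pvScan (cs : List Char) (pats : List String) (p : Nat) : Int × Int :=
  match pvFindAt (cs.drop p) pats 0 with
  | some i => (i, (p : Int))
  | none =>
      match p with
      | 0 => (-1, -1)
      | p' + 1 => pvScan cs pats p'

def rfind_highest_index_in_list_alt (s : String) (l : List String) : Int × Int :=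
  pvScan s.toList l s.toList.length

-- ===== PRECONDITION & SPEC =====
def Spec_rfind_highest_index_in_list (s : String) (l : List String) (out : Int × Int) : Prop := out = rfind_highest_index_in_list_alt s l
instance (s : String) (l : List String) (out : Int × Int) : Decidable (Spec_rfind_highest_index_in_list s l out) := by unfold Spec_rfind_highest_index_in_list; infer_instance

-- ===== CLAIM (what is proved, stated in full; the proofs are below) =====
def Claim_equal_rfind_highest_index_in_list : Prop := ∀ (s : String) (l : List String), Dom_rfind_highest_index_in_list s l → Spec_rfind_highest_index_in_list s l (rfind_highest_index_in_list s l)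

-- ===== LEMMAS AND PROOFS =====

-- A's loop, abstracted over the per-pattern offset function oF
def pvFoldO (oF : String → Int) (xs : List (Int × String)) (st : Int × Int) : Int × Int :=
  xs.foldl
    (fun (st : Int × Int) (ix : Int × String) =>
      let o := oF ix.2
      if o ≠ -1 ∧ o > st.1 then (o, ix.1) else st)
    st

theorem pvFoldO_congr (oF₁ oF₂ : String → Int) (xs : List (Int × String)) (st : Int × Int)
    (h : ∀ ix ∈ xs, oF₁ ix.2 = oF₂ ix.2) : pvFoldO oF₁ xs st = pvFoldO oF₂ xs st := by
  induction xs generalizing st with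
  | nil => rfl
  | cons a t ih =>
      simp only [pvFoldO, List.foldl_cons] at *
      rw [h a (by simp)]
      exact ih _ (fun ix hix => h ix (by simp [hix]))

-- rfind.go is bounded by its third argument
theorem pv_go_le (cs sub : List Char) (p : Nat) : PySem.Chars.rfind.go cs sub p ≤ (p : Int) := by
  induction p with
  | zero => simp only [PySem.Chars.rfind.go]; split <;> simp
  | succ q ih =>
      simp only [PySem.Chars.rfind.go]
      split
      · simp
      · exact le_trans ih (by exact_mod_cast Nat.le_succ q)

-- rfind.go hits its bound exactly on a match at that position …
theorem pv_go_eq_of_match (cs sub : List Char) (p : Nat) (h : sub.isPrefixOf (cs.drop p) = true) :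
    PySem.Chars.rfind.go cs sub p = (p : Int) := by
  cases p with
  | zero => simp only [PySem.Chars.rfind.go]; simp at h ⊢; simp [h]
  | succ q => simp only [PySem.Chars.rfind.go]; simp only [h, if_true]

-- … and stays strictly below it otherwise (at p = 0 it is -1)
theorem pv_go_lt_of_not_match (cs sub : List Char) (p : Nat) (h : ¬ sub.isPrefixOf (cs.drop p) = true) :
    PySem.Chars.rfind.go cs sub p < (p : Int) ∧ (p = 0 → PySem.Chars.rfind.go cs sub p = -1) := by
  cases p with
  | zero =>
      constructor
      · simp only [PySem.Chars.rfind.go]; simp at h; simp [h]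
      · intro _; simp only [PySem.Chars.rfind.go]; simp at h; simp [h]
  | succ q =>
      constructor
      · simp only [PySem.Chars.rfind.go, h]
        exact lt_of_le_of_lt (pv_go_le cs sub q) (by exact_mod_cast Nat.lt_succ_self q)
      · intro hq; omega

-- pvFindAt = none ↔ no pattern matches
theorem pvFindAt_none_iff (tail : List Char) (pats : List String) (i0 : Int) :
    pvFindAt tail pats i0 = none ↔ ∀ q ∈ pats, ¬ q.toList.isPrefixOf tail = true := by
  induction pats generalizing i0 with
  | nil => simp [pvFindAt]
  | cons a t ih =>
      simp only [pvFindAt, PySem.Chars.startswith]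
      split
      · rename_i hm
        constructor
        · intro h; simp at h
        · intro h; exact absurd hm (h a (by simp))
      · rename_i hm; simp only [ih]; constructor
        · intro h q hq
          rcases List.mem_cons.mp hq with h1 | h2
          · subst h1; exact hm
          · exact h q h2
        · intro h q hq; exact h q (List.mem_cons_of_mem _ hq)

-- pvFindAt = some i picks the FIRST matching pattern
theorem pvFindAt_some (tail : List Char) (pats : List String) (i0 i : Int)
    (h : pvFindAt tail pats i0 = some i) :
    ∃ j : Nat, i = i0 + j ∧ j < pats.length ∧ (pats[j]!).toList.isPrefixOf tail = true ∧
      ∀ j' : Nat, j' < j → ¬ (pats[j']!).toList.isPrefixOf tail = true := by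
  induction pats generalizing i0 with
  | nil => simp [pvFindAt] at h
  | cons a t ih =>
      simp only [pvFindAt, PySem.Chars.startswith] at h
      split at h
      · rename_i hm
        refine ⟨0, by simpa using h.symm, by simp, by simpa using hm, by omega⟩
      · rename_i hm
        obtain ⟨j, hij, hjl, hjm, hjf⟩ := ih (i0 + 1) h
        refine ⟨j + 1, by omega, by simpa using hjl, by simpa using hjm, ?_⟩
        intro j' hj'
        cases j' with
        | zero => simpa using hm
        | succ j'' => simpa using hjf j'' (by omega)

-- once the state holds the maximal offset p, the rest of the loop cannot change it
theorem pvFoldO_keep (oF : String → Int) (p : Nat) (v : Int) (xs : List (Int × String))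
    (h : ∀ ix ∈ xs, oF ix.2 ≤ (p : Int)) :
    pvFoldO oF xs ((p : Int), v) = ((p : Int), v) := by
  induction xs with
  | nil => rfl
  | cons a t ih =>
      simp only [pvFoldO, List.foldl_cons]
      have ha := h a (by simp)
      have : ¬ (oF a.2 ≠ -1 ∧ oF a.2 > (p : Int)) := by
        rintro ⟨-, hgt⟩; omega
      simp only [this, if_neg, not_false_iff]
      simpa [pvFoldO] using ih (fun ix hix => h ix (by simp [hix]))

-- the loop over enumerate (from k) returns (p, k + j) when pattern j is the first to
-- reach the maximal offset p and the running offset is still below p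
theorem pvFoldO_hit (oF : String → Int) (p : Nat) (pats : List String) (k : Int) (st : Int × Int)
    (hst : st.1 < (p : Int))
    (hub : ∀ q ∈ pats, oF q ≤ (p : Int))
    (j : Nat) (hjl : j < pats.length) (hjm : oF (pats[j]!) = (p : Int))
    (hjf : ∀ j' : Nat, j' < j → oF (pats[j']!) < (p : Int)) :
    pvFoldO oF (PySem.List.enumerate pats k) st = ((p : Int), k + j) := by
  induction pats generalizing k st j with
  | nil => simp at hjl
  | cons a t ih =>
      rw [PySem.List.enumerate_cons]
      simp only [pvFoldO, List.foldl_cons]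
      cases j with
      | zero =>
          simp only [List.getElem!_cons_zero] at hjm
          have hcond : oF a ≠ -1 ∧ oF a > st.1 := by
            constructor
            · rw [hjm]; omega
            · rw [hjm]; exact hst
          simp only [hcond]
          have hub' : ∀ ix ∈ PySem.List.enumerate t (k + 1), oF ix.2 ≤ (p : Int) := by
            intro ix hix
            obtain ⟨k', hk', hix'⟩ := (PySem.List.mem_enumerate_iff t (k + 1) ix).mp hix
            subst hix'
            exact hub _ (List.mem_cons_of_mem _ (List.getElem_mem hk'))
          have := pvFoldO_keep oF p k (PySem.List.enumerate t (k + 1)) hub'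
          rw [hjm]
          simpa [pvFoldO] using this
      | succ j' =>
          have hna : oF a < (p : Int) := by simpa using hjf 0 (Nat.succ_pos j')
          have hst' : (if oF a ≠ -1 ∧ oF a > st.1 then (oF a, k) else st).1 < (p : Int) := by
            split <;> simp_all
          have := ih (k + 1) _ hst' (fun q hq => hub q (List.mem_cons_of_mem _ hq)) j'
            (by simpa using hjl) (by simpa using hjm)
            (fun j'' hj'' => by simpa using hjf (j'' + 1) (by omega))
          rw [show k + 1 + (j' : Int) = k + (j' + 1 : Nat) by push_cast; ring] at this
          simpa [pvFoldO] using this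
    
-- when no offset can beat -1 the loop never moves
theorem pvFoldO_none (oF : String → Int) (xs : List (Int × String))
    (h : ∀ ix ∈ xs, oF ix.2 = -1) :
    pvFoldO oF xs (-1, -1) = (-1, -1) := by
  induction xs with
  | nil => rfl
  | cons a t ih =>
      simp only [pvFoldO, List.foldl_cons]
      have := h a (by simp)
      simp only [this]
      simpa [pvFoldO] using ih (fun ix hix => h ix (by simp [hix]))

-- main invariant: B's scan from position p equals A's loop with rfind truncated at p
theorem pvScan_eq_foldO (cs : List Char) (pats : List String) (p : Nat) :
    pvScan cs pats p =
      (let r := pvFoldO (fun q => PySem.Chars.rfind.go cs q.toList p) (PySem.List.enumerate pats 0) (-1, -1)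
       (r.2, r.1)) := by
  induction p with
  | zero =>
      cases h : pvFindAt (cs.drop 0) pats 0 with
      | none =>
          have hno := (pvFindAt_none_iff _ _ _).mp h
          have hall : ∀ ix ∈ PySem.List.enumerate pats 0,
              PySem.Chars.rfind.go cs ix.2.toList 0 = -1 := by
            intro ix hix
            obtain ⟨k', hk', hix'⟩ := (PySem.List.mem_enumerate_iff pats 0 ix).mp hix
            subst hix'
            exact (pv_go_lt_of_not_match cs _ 0 (hno _ (List.getElem_mem hk'))).2 rfl
          simp only [pvScan, h]
          rw [pvFoldO_none _ _ hall]
      | some i =>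
          obtain ⟨j, hij, hjl, hjm, hjf⟩ := pvFindAt_some _ _ _ _ h
          have := pvFoldO_hit (fun q => PySem.Chars.rfind.go cs q.toList 0) 0 pats 0 (-1, -1)
            (by norm_num)
            (fun q _ => pv_go_le cs q.toList 0)
            j hjl (pv_go_eq_of_match cs _ 0 hjm)
            (fun j' hj' => by
              have := (pv_go_lt_of_not_match cs (pats[j']!).toList 0 (hjf j' hj')).1
              simpa using this)
          simp only [pvScan, h]
          rw [this]
          simp [hij]
  | succ p' ih =>
      cases h : pvFindAt (cs.drop (p' + 1)) pats 0 with
      | none =>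
          have hno := (pvFindAt_none_iff _ _ _).mp h
          have hstep : ∀ ix ∈ PySem.List.enumerate pats 0,
              PySem.Chars.rfind.go cs ix.2.toList (p' + 1) = PySem.Chars.rfind.go cs ix.2.toList p' := by
            intro ix hix
            obtain ⟨k', hk', hix'⟩ := (PySem.List.mem_enumerate_iff pats 0 ix).mp hix
            subst hix'
            have hq := hno _ (List.getElem_mem hk')
            simp [PySem.Chars.rfind.go, hq]
          simp only [pvScan, h]
          rw [pvFoldO_congr (fun q => PySem.Chars.rfind.go cs q.toList (p' + 1))
            (fun q => PySem.Chars.rfind.go cs q.toList p') _ _ hstep]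
          exact ih
      | some i =>
          obtain ⟨j, hij, hjl, hjm, hjf⟩ := pvFindAt_some _ _ _ _ h
          have := pvFoldO_hit (fun q => PySem.Chars.rfind.go cs q.toList (p' + 1)) (p' + 1) pats 0 (-1, -1)
            (by show (-1 : Int) < ((p' + 1 : Nat) : Int); push_cast; omega)
            (fun q _ => pv_go_le cs q.toList (p' + 1))
            j hjl (pv_go_eq_of_match cs _ (p' + 1) hjm)
            (fun j' hj' => (pv_go_lt_of_not_match cs (pats[j']!).toList (p' + 1) (hjf j' hj')).1)
          simp only [pvScan, h]
          rw [this]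
          simp [hij]

theorem rfind_highest_index_in_list_spec' (s : String) (l : List String) :
    rfind_highest_index_in_list s l = rfind_highest_index_in_list_alt s l := by
  have h1 : rfind_highest_index_in_list s l =
      (let r := pvFoldO (fun q => PySem.Chars.rfind.go s.toList q.toList s.toList.length)
         (PySem.List.enumerate l 0) (-1, -1)
       (r.2, r.1)) := by
    unfold rfind_highest_index_in_list
    rw [show (PySem.List.enumerate l).foldl
        (fun (st : Int × Int) (ix : Int × String) =>
          let o := PySem.Str.rfind s ix.2
          if o ≠ -1 ∧ o > st.1 then (o, ix.1) else st) (-1, -1)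
      = pvFoldO (fun q => PySem.Str.rfind s q) (PySem.List.enumerate l 0) (-1, -1) from rfl]
    rw [pvFoldO_congr (fun q => PySem.Str.rfind s q)
      (fun q => PySem.Chars.rfind.go s.toList q.toList s.toList.length) _ _
      (fun ix _ => by simp [PySem.Str.rfind_eq, PySem.Chars.rfind])]
  rw [h1]
  unfold rfind_highest_index_in_list_alt
  rw [pvScan_eq_foldO]

-- ===== VERDICT (by name: the statement is the Claim_ definition above) =====
theorem rfind_highest_index_in_list_spec : Claim_equal_rfind_highest_index_in_list := by
  intro s l _
  unfold Spec_rfind_highest_index_in_list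
  exact rfind_highest_index_in_list_spec' s l
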